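-- pv_equiv track=rewrite | github.com/JulesPR1/isaac-fastapi | app/scripts/characters_parser.py | __get_life_dict
-- ===== SOURCE A (Python) =====
-- def __get_life_dict(imgs):
--   data = []
--   for img in imgs:
--     if "heart" in img['alt']:
--       data.append(img['alt'])
--     elif "Random" in  img['alt']:
--       return ["Random"]
--
--   return data
-- ===== SOURCE B (Python) =====
-- def __get_life_dict(imgs):
--   if any("Random" in img['alt'] and "heart" not in img['alt'] for img in imgs):
--     return ["Random"]
--   return [img['alt'] for img in imgs if "heart" in img['alt']]
-- ===== Notes on version B (the rewrite author's own statement) =====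
-- stated objective: simpler
-- what changed: Replaces A's single interleaved loop with accumulator and mid-loop early return by two shaped passes: a lazy any() existence check for a Random-without-heart alt, then a comprehension collecting heart alts.
import Mathlib
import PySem

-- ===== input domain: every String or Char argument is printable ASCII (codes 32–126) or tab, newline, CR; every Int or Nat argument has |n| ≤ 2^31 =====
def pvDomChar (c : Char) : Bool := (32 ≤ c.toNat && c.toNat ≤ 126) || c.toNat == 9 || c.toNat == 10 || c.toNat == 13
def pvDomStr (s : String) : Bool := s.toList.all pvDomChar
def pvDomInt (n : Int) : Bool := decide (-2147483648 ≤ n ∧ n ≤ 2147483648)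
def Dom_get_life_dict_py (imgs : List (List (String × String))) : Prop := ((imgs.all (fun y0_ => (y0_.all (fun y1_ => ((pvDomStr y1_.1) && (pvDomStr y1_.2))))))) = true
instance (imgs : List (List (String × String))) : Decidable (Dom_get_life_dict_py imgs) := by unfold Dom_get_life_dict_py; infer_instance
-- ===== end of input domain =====

-- B replaces A's interleaved loop (accumulator + mid-loop early return) with two shaped passes:
-- a lazy any() existence check for a Random-without-heart alt, then a comprehension of the heart alts.
-- Equivalence of the return values is proved on Pre_, the inputs where A raises no KeyError.

-- ===== PORT A =====
-- img['alt'] (KeyError = none)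
def pvAltA (img : List (String × String)) : Option String := (PySem.Dict.mk img).get? "alt"

-- the for-loop of A, with accumulator `data`; none = KeyError
def pvLoopA : List (List (String × String)) → List String → Option (List String)
  | [], data => some data
  | img :: rest, data =>
    match pvAltA img with
    | none => none
    | some alt =>
      if PySem.Str.isIn "heart" alt then pvLoopA rest (data ++ [alt])
      else if PySem.Str.isIn "Random" alt then some ["Random"]
      else pvLoopA rest data

def get_life_dict_py (imgs : List (List (String × String))) : List String :=
  (pvLoopA imgs []).getD []

-- ===== PORT B =====
-- any("Random" in img['alt'] and "heart" not in img['alt'] for img in imgs) — lazy, none = KeyError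
def pvAnyRand : List (List (String × String)) → Option Bool
  | [] => some false
  | img :: rest =>
    match (PySem.Dict.mk img).get? "alt" with
    | none => none
    | some alt =>
      if PySem.Str.isIn "Random" alt && !PySem.Str.isIn "heart" alt then some true
      else pvAnyRand rest

-- [img['alt'] for img in imgs if "heart" in img['alt']] — none = KeyError
def pvHearts : List (List (String × String)) → Option (List String)
  | [] => some []
  | img :: rest =>
    match (PySem.Dict.mk img).get? "alt" with
    | none => none
    | some alt =>
      (pvHearts rest).map (fun t => if PySem.Str.isIn "heart" alt then alt :: t else t)

def get_life_dict_py_alt (imgs : List (List (String × String))) : List String :=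
  (match pvAnyRand imgs with
   | none => none
   | some true => some ["Random"]
   | some false => pvHearts imgs).getD []

-- ===== PRECONDITION & SPEC =====
-- img has an 'alt' key
def pvOkB (img : List (String × String)) : Bool := ((PySem.Dict.mk img).get? "alt").isSome
-- this img triggers A's early return
def pvStopB (img : List (String × String)) : Bool :=
  match (PySem.Dict.mk img).get? "alt" with
  | none => false
  | some alt => PySem.Str.isIn "Random" alt && !PySem.Str.isIn "heart" alt

-- Pre_ = exactly the inputs on which the Python A returns (no KeyError): every img that A's loop
-- actually reaches (no earlier missing-'alt' img and no earlier early-return img) has an 'alt' key.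
def Pre_get_life_dict_py (imgs : List (List (String × String))) : Prop :=
  ∀ i : Fin imgs.length,
    (∀ j : Fin imgs.length, j.val < i.val → (pvOkB imgs[j] && !pvStopB imgs[j]) = true) →
    pvOkB imgs[i] = true
instance (imgs : List (List (String × String))) : Decidable (Pre_get_life_dict_py imgs) := by
  unfold Pre_get_life_dict_py; infer_instance

def pvWitness_get_life_dict_py : (List (List (String × String))) :=
  [[("alt", "Red heart")], [("alt", "Random")], [("src", "x")]]

def Spec_get_life_dict_py (imgs : List (List (String × String))) (out : List String) : Prop := out = get_life_dict_py_alt imgs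
instance (imgs : List (List (String × String))) (out : List String) : Decidable (Spec_get_life_dict_py imgs out) := by unfold Spec_get_life_dict_py; infer_instance

-- ===== CLAIM (what is proved, stated in full; the proofs are below) =====
def Claim_equal_get_life_dict_py : Prop := ∀ (imgs : List (List (String × String))), Dom_get_life_dict_py imgs → Pre_get_life_dict_py imgs → Spec_get_life_dict_py imgs (get_life_dict_py imgs)

-- ===== LEMMAS AND PROOFS =====

-- The option-level computations agree for every accumulator (in fact on all inputs;
-- Pre_ is only needed so that the ports' .getD [] is never reached in Python).
theorem pvLoopA_eq (imgs : List (List (String × String))) :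
    ∀ data : List String,
      pvLoopA imgs data =
        (match pvAnyRand imgs with
         | none => none
         | some true => some ["Random"]
         | some false => (pvHearts imgs).map (fun t => data ++ t)) := by
  induction imgs with
  | nil => intro data; simp [pvLoopA, pvAnyRand, pvHearts]
  | cons img rest ih =>
    intro data
    simp only [pvLoopA, pvAnyRand, pvHearts, pvAltA]
    cases hget : (PySem.Dict.mk img).get? "alt" with
    | none => rfl
    | some alt =>
      simp only []
      by_cases hh : PySem.Str.isIn "heart" alt = true
      · simp only [hh, if_true, Bool.not_true, Bool.and_false, ih (data ++ [alt])]
        cases pvAnyRand rest with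
        | none => rfl
        | some b =>
          cases b with
          | true => rfl
          | false =>
            cases pvHearts rest with
            | none => rfl
            | some t => simp
      · have hh' : PySem.Str.isIn "heart" alt = false := Bool.eq_false_iff.mpr hh
        rw [if_neg hh]
        by_cases hr : PySem.Str.isIn "Random" alt = true
        · have hc : (PySem.Str.isIn "Random" alt && !PySem.Str.isIn "heart" alt) = true := by
            rw [hr, hh']; rfl
          rw [if_pos hr, if_pos hc]
        · have hr' : PySem.Str.isIn "Random" alt = false := Bool.eq_false_iff.mpr hr
          have hc : ¬((PySem.Str.isIn "Random" alt && !PySem.Str.isIn "heart" alt) = true) := by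
            rw [hr']; simp
          rw [if_neg hr, if_neg hc, ih data]
          cases pvAnyRand rest with
          | none => rfl
          | some b =>
            cases b with
            | true => rfl
            | false =>
              cases pvHearts rest with
              | none => rfl
              | some t => simpa using hh'

-- ===== VERDICT (by name: the statement is the Claim_ definition above) =====
theorem get_life_dict_py_spec : Claim_equal_get_life_dict_py := by
  intro imgs _ _
  unfold Spec_get_life_dict_py get_life_dict_py get_life_dict_py_alt
  rw [pvLoopA_eq imgs []]
  cases pvAnyRand imgs with
  | none => rfl
  | some b =>
    cases b with
    | true => rfl
    | false =>
      cases pvHearts imgs with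
      | none => rfl
      | some t => simp
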